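-- pv_equiv track=rewrite | github.com/namn44241/Toan_roi_rac | Bai 3. Tong hop/Ex 2.py | count_non_negative_solutions
-- ===== SOURCE A (Python) =====
-- def count_non_negative_solutions(N):
--     count = 0
--     for x1 in range(N + 1):
--         for x2 in range(N + 1):
--             x3 = N - x1 - x2
--             if x3 >= 0:
--                 count += 1
--     return count
-- ===== SOURCE B (Python) =====
-- def count_non_negative_solutions(N):
--     # closed form: number of (x1,x2) with x1,x2>=0, x1+x2<=N is (N+1)(N+2)/2
--     if N < 0:
--         return 0
--     return (N + 1) * (N + 2) // 2
-- ===== Notes on version B (the rewrite author's own statement) =====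
-- stated objective: faster
-- what changed: Replaced the double loop over all (x1,x2) pairs by the closed-form binomial count (N+1)(N+2)//2.
import Mathlib
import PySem

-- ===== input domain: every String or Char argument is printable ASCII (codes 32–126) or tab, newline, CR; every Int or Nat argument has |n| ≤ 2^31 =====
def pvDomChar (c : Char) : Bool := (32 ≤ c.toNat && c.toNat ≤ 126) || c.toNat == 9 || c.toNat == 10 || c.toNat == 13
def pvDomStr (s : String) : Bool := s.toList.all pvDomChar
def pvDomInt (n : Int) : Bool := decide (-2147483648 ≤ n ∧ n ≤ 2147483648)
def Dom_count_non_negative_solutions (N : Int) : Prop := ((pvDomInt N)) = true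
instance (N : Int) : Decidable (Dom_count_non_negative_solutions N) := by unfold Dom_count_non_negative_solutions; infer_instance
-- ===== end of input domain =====

-- B replaces A's O(N^2) double loop by the closed form (N+1)(N+2)//2 (objective: faster).

-- ===== PORT A =====
def count_non_negative_solutions (N : Int) : Int :=
  (PySem.List.pyRange 0 (N + 1) 1).foldl (fun count x1 =>
    (PySem.List.pyRange 0 (N + 1) 1).foldl (fun count x2 =>
      let x3 := N - x1 - x2
      if 0 ≤ x3 then count + 1 else count) count) 0

-- ===== PORT B =====
def count_non_negative_solutions_alt (N : Int) : Int :=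
  if N < 0 then 0
  else PySem.Int.floordiv ((N + 1) * (N + 2)) 2

-- ===== PRECONDITION & SPEC =====
def Spec_count_non_negative_solutions (N : Int) (out : Int) : Prop := out = count_non_negative_solutions_alt N
instance (N : Int) (out : Int) : Decidable (Spec_count_non_negative_solutions N out) := by unfold Spec_count_non_negative_solutions; infer_instance

-- ===== CLAIM (what is proved, stated in full; the proofs are below) =====
def Claim_equal_count_non_negative_solutions : Prop := ∀ (N : Int), Dom_count_non_negative_solutions N → Spec_count_non_negative_solutions N (count_non_negative_solutions N)

-- ===== LEMMAS AND PROOFS =====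

-- counting fold = countP
lemma pv_fold_count (p : Int → Prop) [DecidablePred p] (l : List Int) (c : Int) :
    l.foldl (fun c x => if p x then c + 1 else c) c = c + (l.countP (fun x => decide (p x)) : Int) := by
  induction l generalizing c with
  | nil => simp
  | cons a t ih =>
    simp only [List.foldl_cons, List.countP_cons, ih]
    by_cases h : p a
    · simp [h]; ring
    · simp [h]

-- number of x in [0, b) with x ≤ t, when 0 ≤ t < b
lemma pv_countP_range (b t : Int) (h0 : 0 ≤ t) (hb : t < b) :
    ((PySem.List.pyRange 0 b 1).countP (fun x => decide (0 ≤ t - x)) : Int) = t + 1 := by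
  rw [PySem.List.pyRange_one_append 0 (t + 1) b (by omega) (by omega), List.countP_append]
  have h1 : (PySem.List.pyRange 0 (t + 1) 1).countP (fun x => decide (0 ≤ t - x))
      = (PySem.List.pyRange 0 (t + 1) 1).length := by
    apply List.countP_eq_length.mpr
    intro x hx
    rw [PySem.List.mem_pyRange_one] at hx
    simp; omega
  have h2 : (PySem.List.pyRange (t + 1) b 1).countP (fun x => decide (0 ≤ t - x)) = 0 := by
    apply List.countP_eq_zero.mpr
    intro x hx
    rw [PySem.List.mem_pyRange_one] at hx
    simp; omega
  rw [h1, h2, PySem.List.length_pyRange_one]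
  push_cast
  omega

-- the inner loop adds N - x1 + 1 when 0 ≤ x1 ≤ N
lemma pv_inner (N x1 c : Int) (h0 : 0 ≤ x1) (h1 : x1 ≤ N) :
    (PySem.List.pyRange 0 (N + 1) 1).foldl (fun count x2 =>
      let x3 := N - x1 - x2
      if 0 ≤ x3 then count + 1 else count) c = c + (N - x1 + 1) := by
  simp only []
  rw [pv_fold_count (fun x2 => 0 ≤ N - x1 - x2)]
  rw [pv_countP_range (N + 1) (N - x1) (by omega) (by omega)]

-- outer loop total for 0 ≤ N, by induction on the Nat size of the range
lemma pv_outer (n : Nat) (N : Int) (hN : N = n) :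
    (PySem.List.pyRange 0 (N + 1) 1).foldl (fun count x1 =>
      (PySem.List.pyRange 0 (N + 1) 1).foldl (fun count x2 =>
        let x3 := N - x1 - x2
        if 0 ≤ x3 then count + 1 else count) count) 0
    * 2 = (N + 1) * (N + 2) := by
  have key : ∀ (m : Nat) (c : Int), (m : Int) ≤ N + 1 →
      (PySem.List.pyRange 0 (m : Int) 1).foldl (fun count x1 =>
        (PySem.List.pyRange 0 (N + 1) 1).foldl (fun count x2 =>
          let x3 := N - x1 - x2
          if 0 ≤ x3 then count + 1 else count) count) c
      * 2 = c * 2 + (m : Int) * (2 * N + 3 - m) := by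
    intro m
    induction m with
    | zero =>
      intro c _
      simp only [Nat.cast_zero]
      rw [PySem.List.pyRange_one_eq_nil (le_refl 0)]
      simp
    | succ k ih =>
      intro c hm
      have hk : (k : Int) ≤ N + 1 := by push_cast at hm ⊢; omega
      rw [show ((k + 1 : Nat) : Int) = (k : Int) + 1 by push_cast; ring,
        PySem.List.pyRange_one_succ_right (a := 0) (b := (k : Int)) (Int.natCast_nonneg k), List.foldl_append]
      simp only [List.foldl_cons, List.foldl_nil]
      rw [pv_inner N (k : Int) _ (Int.natCast_nonneg k) (by push_cast at hm; omega)]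
      rw [add_mul, ih c hk]
      ring
  have := key (n + 1) 0 (by omega)
  rw [show ((n + 1 : Nat) : Int) = N + 1 by omega] at this
  rw [this]
  ring

-- ===== VERDICT (by name: the statement is the Claim_ definition above) =====
theorem count_non_negative_solutions_spec : Claim_equal_count_non_negative_solutions := by
  intro N _
  unfold Spec_count_non_negative_solutions count_non_negative_solutions count_non_negative_solutions_alt
  by_cases h : N < 0
  · rw [if_pos h, PySem.List.pyRange_one_eq_nil (by omega)]
    simp
  · rw [if_neg h]
    obtain ⟨n, hn⟩ : ∃ n : Nat, N = (n : Int) := ⟨N.toNat, by omega⟩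
    have h2 := pv_outer n N hn
    have : (N + 1) * (N + 2) = 2 * ((PySem.List.pyRange 0 (N + 1) 1).foldl (fun count x1 =>
      (PySem.List.pyRange 0 (N + 1) 1).foldl (fun count x2 =>
        let x3 := N - x1 - x2
        if 0 ≤ x3 then count + 1 else count) count) 0) := by omega
    rw [this, PySem.Int.floordiv_eq_ediv_of_pos (by omega), Int.mul_ediv_cancel_left _ (by omega)]
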